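-- pv_equiv track=rewrite | github.com/keanugonza/Tubes-TBFO | OpenFile.py | handleString
-- ===== SOURCE A (Python) =====
-- def handleString(arr):
--     # Menghandle string yang bisa menimbulkan error
--     for i in range (len(arr)-1):
--         if arr[i] == '>' and arr[i+1] != '<':
--             while i+1 < len(arr) and arr[i+1] != '<':
--                 arr.pop(i+1)
--                 arr.insert(i+1, 'string')
--                 i += 1
--     return arr
-- ===== SOURCE B (Python) =====
-- def handleString(arr):
--     # One linear pass with an "inside a > ... < region" flag, instead of the
--     # nested for+while that repeatedly pops and re-inserts.
--     out = []
--     flag = False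
--     for x in arr:
--         if x == '<':
--             flag = False
--             out.append(x)
--         elif flag:
--             out.append('string')
--         elif x == '>':
--             flag = True
--             out.append(x)
--         else:
--             out.append(x)
--     arr[:] = out  # A mutates arr in place; keep that observable behaviour
--     return arr
-- ===== Notes on version B (the rewrite author's own statement) =====
-- stated objective: simpler
-- what changed: Replaced the nested for+while that repeatedly pops and re-inserts 'string' at index i+1 with a single linear pass carrying an in-region boolean flag.
import Mathlib
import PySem

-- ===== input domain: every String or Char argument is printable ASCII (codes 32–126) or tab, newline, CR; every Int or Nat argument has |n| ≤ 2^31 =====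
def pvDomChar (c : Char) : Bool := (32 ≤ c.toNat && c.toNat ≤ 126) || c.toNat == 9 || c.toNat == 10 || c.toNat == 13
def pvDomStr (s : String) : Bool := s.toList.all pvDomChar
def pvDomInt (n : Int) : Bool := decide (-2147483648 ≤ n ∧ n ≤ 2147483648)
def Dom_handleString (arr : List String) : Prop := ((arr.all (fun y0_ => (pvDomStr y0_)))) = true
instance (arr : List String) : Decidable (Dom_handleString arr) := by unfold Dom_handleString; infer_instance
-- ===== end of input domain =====

-- B replaces A's nested for+while (repeated pop/insert at i+1) by one linear pass with an
-- in-region flag (objective: simpler). A mutates arr in place and returns it; B rebuilds the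
-- list and writes it back (arr[:] = out) — the equivalence proved here is about the returned value.

-- ===== PORT A =====
-- Inner 'while i+1 < len(arr) and arr[i+1] != "<"' loop: arr.pop(i+1); arr.insert(i+1,'string'); i += 1.
-- pop/insert go through PySem.List.pop?/insert; the read arr[i+1] is exact as getD since the
-- guard keeps 0 ≤ i+1 < len (pop then insert preserves the length).
def innerA (a : List String) (i : Nat) : List String :=
  if h : i + 1 < a.length ∧ a.getD (i+1) "" ≠ "<" then
    match h2 : PySem.List.pop? a ((i : Int) + 1) with
    | some r => innerA (PySem.List.insert r.2 ((i : Int) + 1) "string") (i + 1)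
    | none => a
  else a
termination_by a.length - i
decreasing_by
  obtain ⟨hi, -⟩ := h
  have h1 := PySem.List.length_of_pop?_eq_some a h2
  have h3 := PySem.List.length_insert r.2 ((i : Int) + 1) "string"
  omega

-- 'for i in range(len(arr)-1): if arr[i] == ">" and arr[i+1] != "<": <inner while>'
-- (the list length never changes, so i and i+1 stay in range: getD is exact)
def handleString (arr : List String) : List String :=
  (List.range (arr.length - 1)).foldl
    (fun a i => if a.getD i "" = ">" ∧ a.getD (i+1) "" ≠ "<" then innerA a i else a) arr

-- ===== PORT B =====
-- One pass over arr carrying (out, flag); branch order as in Source B: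
-- '<' closes a region, flag rewrites to 'string', '>' opens a region, else copy.
def handleString_alt (arr : List String) : List String :=
  (arr.foldl
    (fun (st : List String × Bool) x =>
      if x = "<" then (st.1 ++ [x], false)
      else if st.2 then (st.1 ++ ["string"], true)
      else if x = ">" then (st.1 ++ [x], true)
      else (st.1 ++ [x], st.2))
    ([], false)).1

-- ===== PRECONDITION & SPEC =====
def Spec_handleString (arr : List String) (out : List String) : Prop := out = handleString_alt arr
instance (arr : List String) (out : List String) : Decidable (Spec_handleString arr out) := by unfold Spec_handleString; infer_instance

-- ===== CLAIM (what is proved, stated in full; the proofs are below) =====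
def Claim_equal_handleString : Prop := ∀ (arr : List String), Dom_handleString arr → Spec_handleString arr (handleString arr)

-- ===== LEMMAS AND PROOFS =====

-- classical if-then-else on Prop conditions (proof-side only)
noncomputable def pvIte (c : Prop) (a b : String) : String :=
  @ite _ c (Classical.propDecidable c) a b

lemma pvIte_pos {c : Prop} {a b : String} (h : c) : pvIte c a b = a := by
  unfold pvIte; exact if_pos h

lemma pvIte_neg {c : Prop} {a b : String} (h : ¬ c) : pvIte c a b = b := by
  unfold pvIte; exact if_neg h

lemma pvIte_congr {c d : Prop} {a b : String} (h : c ↔ d) : pvIte c a b = pvIte d a b := by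
  by_cases hc : c
  · rw [pvIte_pos hc, pvIte_pos (h.mp hc)]
  · rw [pvIte_neg hc, pvIte_neg (fun hd => hc (h.mpr hd))]

-- Proof-side vocabulary: position p of the final list is rewritten to "string" iff the
-- original value there is not "<" and some earlier ">" (below the opener bound k) reaches p
-- with no "<" strictly in between.
def pvNoPre (xs : List String) (p : Nat) : Prop := ∀ r, r < p → xs.getD r "" ≠ "<"
def pvBlocked (xs : List String) (q p : Nat) : Prop := ∃ r, q < r ∧ r < p ∧ xs.getD r "" = "<"
def pvCovK (xs : List String) (k p : Nat) : Prop := ∃ q, q < k ∧ q < p ∧ xs.getD q "" = ">" ∧ ¬ pvBlocked xs q p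
def pvCov (xs : List String) (p : Nat) : Prop := pvCovK xs p p

-- structural-recursion form of B's single pass
def pvMark : List String → Bool → List String
  | [], _ => []
  | x :: xs, f =>
    if x = "<" then x :: pvMark xs false
    else if f then "string" :: pvMark xs true
    else if x = ">" then x :: pvMark xs true
    else x :: pvMark xs f

lemma foldB (xs : List String) : ∀ (acc : List String) (f : Bool),
    (xs.foldl
      (fun (st : List String × Bool) x =>
        if x = "<" then (st.1 ++ [x], false)
        else if st.2 then (st.1 ++ ["string"], true)
        else if x = ">" then (st.1 ++ [x], true)
        else (st.1 ++ [x], st.2))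
      (acc, f)).1 = acc ++ pvMark xs f := by
  induction xs with
  | nil => intro acc f; simp [pvMark]
  | cons x xs ih =>
    intro acc f
    simp only [List.foldl_cons, pvMark]
    by_cases h1 : x = "<"
    · simp [h1, ih]
    · by_cases h2 : f
      · simp [h1, h2, ih]
      · by_cases h3 : x = ">"
        · simp [h2, h3, ih]
        · simp [h1, h2, h3, ih]

lemma altEq (xs : List String) : handleString_alt xs = pvMark xs false := by
  simpa using foldB xs [] false

lemma markLen (xs : List String) : ∀ f, (pvMark xs f).length = xs.length := by
  induction xs with
  | nil => intro f; simp [pvMark]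
  | cons x xs ih => intro f; simp only [pvMark]; split_ifs <;> simp [ih]

lemma pvNoPre_succ (x : String) (xs : List String) (p : Nat) :
    pvNoPre (x :: xs) (p+1) ↔ x ≠ "<" ∧ pvNoPre xs p := by
  constructor
  · intro h
    refine ⟨by simpa using h 0 (by omega), fun r hr => by simpa using h (r+1) (by omega)⟩
  · rintro ⟨hx, h⟩ r hr
    cases r with
    | zero => simpa using hx
    | succ r => simpa using h r (by omega)

lemma pvCov_succ (x : String) (xs : List String) (p : Nat) :
    pvCov (x :: xs) (p+1) ↔ (x = ">" ∧ pvNoPre xs p) ∨ pvCov xs p := by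
  constructor
  · rintro ⟨q, hq1, hq2, hq3, hq4⟩
    cases q with
    | zero =>
      left
      refine ⟨by simpa using hq3, fun r hr hlt => ?_⟩
      exact hq4 ⟨r+1, by omega, by omega, by simpa using hlt⟩
    | succ q =>
      right
      refine ⟨q, by omega, by omega, by simpa using hq3, ?_⟩
      rintro ⟨r, hr1, hr2, hr3⟩
      exact hq4 ⟨r+1, by omega, by omega, by simpa using hr3⟩
  · rintro (⟨hx, h⟩ | ⟨q, hq1, hq2, hq3, hq4⟩)
    · refine ⟨0, by omega, by omega, by simpa using hx, ?_⟩
      rintro ⟨r, hr1, hr2, hr3⟩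
      cases r with
      | zero => omega
      | succ r => exact h r (by omega) (by simpa using hr3)
    · refine ⟨q+1, by omega, by omega, by simpa using hq3, ?_⟩
      rintro ⟨r, hr1, hr2, hr3⟩
      cases r with
      | zero => omega
      | succ r => exact hq4 ⟨r, by omega, by omega, by simpa using hr3⟩

lemma markGet (xs : List String) : ∀ (f : Bool) (p : Nat), p < xs.length →
    (pvMark xs f).getD p "" =
      pvIte (xs.getD p "" ≠ "<" ∧ ((f = true ∧ pvNoPre xs p) ∨ pvCov xs p)) "string"
        (xs.getD p "") := by
  induction xs with
  | nil => intro f p hp; simp at hp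
  | cons x xs ih =>
    intro f p hp
    cases p with
    | zero =>
      have hcov : ¬ pvCov (x :: xs) 0 := by rintro ⟨q, hq, -⟩; omega
      have hnp : pvNoPre (x :: xs) 0 := fun r hr => by omega
      simp only [pvMark]
      by_cases h1 : x = "<"
      · rw [if_pos h1, List.getD_cons_zero, List.getD_cons_zero,
          pvIte_neg (by rintro ⟨ha, -⟩; exact ha h1)]
      · rw [if_neg h1]
        by_cases h2 : f
        · rw [if_pos h2, List.getD_cons_zero, List.getD_cons_zero,
            pvIte_pos ⟨h1, Or.inl ⟨h2, hnp⟩⟩]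
        · rw [if_neg h2]
          by_cases h3 : x = ">"
          · rw [if_pos h3, List.getD_cons_zero, List.getD_cons_zero,
              pvIte_neg (by rintro ⟨-, (⟨hf, -⟩ | hcv)⟩; exacts [h2 hf, hcov hcv])]
          · rw [if_neg h3, List.getD_cons_zero, List.getD_cons_zero,
              pvIte_neg (by rintro ⟨-, (⟨hf, -⟩ | hcv)⟩; exacts [h2 hf, hcov hcv])]
    | succ p =>
      have hp' : p < xs.length := by simpa using hp
      simp only [pvMark]
      by_cases h1 : x = "<"
      · rw [if_pos h1, List.getD_cons_succ, List.getD_cons_succ, ih false p hp']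
        apply pvIte_congr
        constructor
        · rintro ⟨ha, (⟨hb, -⟩ | hb)⟩
          · simp at hb
          · exact ⟨ha, Or.inr ((pvCov_succ x xs p).mpr (Or.inr hb))⟩
        · rintro ⟨ha, (⟨-, hb⟩ | hb)⟩
          · rw [pvNoPre_succ] at hb
            exact absurd h1 hb.1
          · rcases (pvCov_succ x xs p).mp hb with ⟨hb1, -⟩ | hb'
            · exact absurd h1 (by rw [hb1]; decide)
            · exact ⟨ha, Or.inr hb'⟩
      · rw [if_neg h1]
        by_cases h2 : f
        · rw [if_pos h2, List.getD_cons_succ, List.getD_cons_succ, ih true p hp']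
          apply pvIte_congr
          constructor
          · rintro ⟨ha, (⟨-, hb⟩ | hb)⟩
            · exact ⟨ha, Or.inl ⟨h2, (pvNoPre_succ x xs p).mpr ⟨h1, hb⟩⟩⟩
            · exact ⟨ha, Or.inr ((pvCov_succ x xs p).mpr (Or.inr hb))⟩
          · rintro ⟨ha, (⟨-, hb⟩ | hb)⟩
            · exact ⟨ha, Or.inl ⟨rfl, ((pvNoPre_succ x xs p).mp hb).2⟩⟩
            · rcases (pvCov_succ x xs p).mp hb with ⟨-, hb'⟩ | hb'
              · exact ⟨ha, Or.inl ⟨rfl, hb'⟩⟩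
              · exact ⟨ha, Or.inr hb'⟩
        · rw [if_neg h2]
          by_cases h3 : x = ">"
          · rw [if_pos h3, List.getD_cons_succ, List.getD_cons_succ, ih true p hp']
            apply pvIte_congr
            constructor
            · rintro ⟨ha, (⟨-, hb⟩ | hb)⟩
              · exact ⟨ha, Or.inr ((pvCov_succ x xs p).mpr (Or.inl ⟨h3, hb⟩))⟩
              · exact ⟨ha, Or.inr ((pvCov_succ x xs p).mpr (Or.inr hb))⟩
            · rintro ⟨ha, (⟨hb, -⟩ | hb)⟩
              · exact absurd hb h2
              · rcases (pvCov_succ x xs p).mp hb with ⟨-, hb'⟩ | hb'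
                · exact ⟨ha, Or.inl ⟨rfl, hb'⟩⟩
                · exact ⟨ha, Or.inr hb'⟩
          · rw [if_neg h3, List.getD_cons_succ, List.getD_cons_succ, ih f p hp']
            apply pvIte_congr
            constructor
            · rintro ⟨ha, (⟨hb, hc⟩ | hb)⟩
              · exact ⟨ha, Or.inl ⟨hb, (pvNoPre_succ x xs p).mpr ⟨h1, hc⟩⟩⟩
              · exact ⟨ha, Or.inr ((pvCov_succ x xs p).mpr (Or.inr hb))⟩
            · rintro ⟨ha, (⟨hb, hc⟩ | hb)⟩
              · exact ⟨ha, Or.inl ⟨hb, ((pvNoPre_succ x xs p).mp hc).2⟩⟩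
              · rcases (pvCov_succ x xs p).mp hb with ⟨hb', -⟩ | hb'
                · exact absurd hb' h3
                · exact ⟨ha, Or.inr hb'⟩

-- A-side: pop(i+1) followed by insert(i+1,'string') is setting index i+1
lemma getD_set (a : List String) (n p : Nat) (v : String) :
    (a.set n v).getD p "" = if n = p ∧ n < a.length then v else a.getD p "" := by
  simp only [List.getD_eq_getElem?_getD, List.getElem?_set]
  split_ifs with h1 h2 h3 h3 <;> simp_all
  omega

lemma popins (a : List String) (i : Nat) (hi : i + 1 < a.length) :
    (PySem.List.pop? a ((i : Int) + 1)).map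
      (fun r => PySem.List.insert r.2 ((i : Int) + 1) "string") =
    some (a.set (i+1) "string") := by
  have hc : ((i : Int) + 1) = ((i + 1 : Nat) : Int) := by push_cast; ring
  rw [hc, PySem.List.pop?_natCast a (i+1) hi, Option.map_some]
  have hlen : i + 1 ≤ (a.eraseIdx (i+1)).length := by
    rw [List.length_eraseIdx_of_lt hi]; omega
  rw [PySem.List.insert_natCast _ _ _ hlen, List.eraseIdx_eq_take_drop_succ]
  have htk : (a.take (i+1) ++ a.drop (i+1+1)).take (i+1) = a.take (i+1) := by
    rw [List.take_append_of_le_length (by simp; omega)]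
    simp
  have hdr : (a.take (i+1) ++ a.drop (i+1+1)).drop (i+1) = a.drop (i+1+1) := by
    rw [List.drop_append_of_le_length (by simp; omega)]
    simp
  rw [htk, hdr, List.set_eq_take_append_cons_drop, if_pos hi]

lemma innerA_len (a : List String) (i : Nat) : (innerA a i).length = a.length := by
  fun_induction innerA a i with
  | case1 a i h r h2 ih =>
    rw [ih, PySem.List.length_insert]
    have := PySem.List.length_of_pop?_eq_some a h2
    omega
  | case2 a i h h2 => rfl
  | case3 a i h => rfl

lemma innerA_getD (a : List String) (i : Nat) : ∀ (p : Nat), p < a.length →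
    (innerA a i).getD p "" =
      pvIte (i + 1 ≤ p ∧ (∀ r, i + 1 ≤ r → r ≤ p → a.getD r "" ≠ "<")) "string"
        (a.getD p "") := by
  fun_induction innerA a i with
  | case1 a i h r h2 ih =>
    intro p hp
    obtain ⟨hi, hne⟩ := h
    have hset : PySem.List.insert r.2 ((i : Int) + 1) "string" = a.set (i+1) "string" := by
      have := popins a i hi
      rw [h2, Option.map_some] at this
      exact Option.some.inj this
    rw [hset] at ih ⊢
    have hlen : (a.set (i+1) "string").length = a.length := by simp
    rw [ih p (by omega)]
    by_cases hc1 : p < i + 1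
    · rw [pvIte_neg (by rintro ⟨h', -⟩; omega), pvIte_neg (by rintro ⟨h', -⟩; omega),
        getD_set, if_neg (by rintro ⟨h', -⟩; omega)]
    · by_cases hc2 : p = i + 1
      · subst hc2
        rw [pvIte_neg (by rintro ⟨h', -⟩; omega),
          pvIte_pos ⟨by omega, fun r hr1 hr2 => by
            have : r = i + 1 := by omega
            rw [this]; exact hne⟩]
        rw [getD_set, if_pos ⟨rfl, hi⟩]
      · -- p ≥ i + 2
        have hge : i + 2 ≤ p := by omega
        have hcond : (i + 1 + 1 ≤ p ∧ ∀ r, i + 1 + 1 ≤ r → r ≤ p → (a.set (i+1) "string").getD r "" ≠ "<") ↔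
            (i + 1 ≤ p ∧ ∀ r, i + 1 ≤ r → r ≤ p → a.getD r "" ≠ "<") := by
          constructor
          · rintro ⟨-, hC⟩
            refine ⟨by omega, fun r' h1' h2' => ?_⟩
            by_cases hr : r' = i + 1
            · rw [hr]; exact hne
            · have := hC r' (by omega) h2'
              rwa [getD_set, if_neg (by rintro ⟨he, -⟩; omega)] at this
          · rintro ⟨-, hC⟩
            refine ⟨by omega, fun r' h1' h2' => ?_⟩
            rw [getD_set, if_neg (by rintro ⟨he, -⟩; omega)]
            exact hC r' (by omega) h2'
        rw [pvIte_congr hcond]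
        by_cases hc : i + 1 ≤ p ∧ ∀ r', i + 1 ≤ r' → r' ≤ p → a.getD r' "" ≠ "<"
        · rw [pvIte_pos hc, pvIte_pos hc]
        · rw [pvIte_neg hc, pvIte_neg hc, getD_set, if_neg (by rintro ⟨he, -⟩; omega)]
  | case2 a i h h2 =>
    -- pop? cannot return none: i+1 is in range
    obtain ⟨hi, -⟩ := h
    have := popins a i hi
    rw [h2] at this
    simp at this
  | case3 a i h =>
    intro p hp
    rw [Decidable.not_and_iff_or_not] at h
    rcases h with h | h
    · rw [pvIte_neg (by rintro ⟨h1, -⟩; omega)]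
    · rw [not_not] at h
      rw [pvIte_neg (by rintro ⟨h1, hC⟩; exact hC (i+1) (by omega) (by omega) h)]

def pvStep (a : List String) (i : Nat) : List String :=
  if a.getD i "" = ">" ∧ a.getD (i+1) "" ≠ "<" then innerA a i else a

lemma covK_succ (xs : List String) (i p : Nat) :
    pvCovK xs (i+1) p ↔ pvCovK xs i p ∨ (i < p ∧ xs.getD i "" = ">" ∧ ¬ pvBlocked xs i p) := by
  constructor
  · rintro ⟨q, hq1, hq2, hq3, hq4⟩
    by_cases h : q < i
    · exact Or.inl ⟨q, h, hq2, hq3, hq4⟩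
    · have : q = i := by omega
      subst this
      exact Or.inr ⟨hq2, hq3, hq4⟩
  · rintro (⟨q, hq1, hq2, hq3, hq4⟩ | ⟨h1, h2, h3⟩)
    · exact ⟨q, by omega, hq2, hq3, hq4⟩
    · exact ⟨i, by omega, h1, h2, h3⟩

lemma pvStep_inv (xs a : List String) (i : Nat) (hi : i + 1 < xs.length)
    (hlen : a.length = xs.length)
    (hA : ∀ p, p < xs.length →
      a.getD p "" = pvIte (xs.getD p "" ≠ "<" ∧ pvCovK xs i p) "string" (xs.getD p "")) :
    (pvStep a i).length = xs.length ∧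
    ∀ p, p < xs.length →
      (pvStep a i).getD p "" =
        pvIte (xs.getD p "" ≠ "<" ∧ pvCovK xs (i+1) p) "string" (xs.getD p "") := by
  unfold pvStep
  by_cases htrig : a.getD i "" = ">" ∧ a.getD (i+1) "" ≠ "<"
  · rw [if_pos htrig]
    obtain ⟨ht1, ht2⟩ := htrig
    -- from a[i] = ">": xs[i] = ">" and i is not itself covered
    have hxi : xs.getD i "" = ">" ∧ ¬ pvCovK xs i i := by
      have h' := hA i (by omega)
      rw [ht1] at h'
      by_cases hc : xs.getD i "" ≠ "<" ∧ pvCovK xs i i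
      · rw [pvIte_pos hc] at h'; exact absurd h'.symm (by decide)
      · rw [pvIte_neg hc] at h'
        refine ⟨h'.symm, fun hcov => hc ⟨by rw [← h']; decide, hcov⟩⟩
    refine ⟨by rw [innerA_len, hlen], fun p hp => ?_⟩
    rw [innerA_getD a i p (by omega)]
    by_cases hC : i + 1 ≤ p ∧ ∀ r, i + 1 ≤ r → r ≤ p → a.getD r "" ≠ "<"
    · rw [pvIte_pos hC]
      obtain ⟨hC1, hC2⟩ := hC
      have hxp : xs.getD p "" ≠ "<" := by
        have hap := hC2 p hC1 (le_refl p)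
        have h' := hA p hp
        by_cases hc : xs.getD p "" ≠ "<" ∧ pvCovK xs i p
        · exact hc.1
        · rw [pvIte_neg hc] at h'; rwa [h'] at hap
      have hcov : pvCovK xs (i+1) p := by
        refine ⟨i, by omega, by omega, hxi.1, ?_⟩
        rintro ⟨r, hr1, hr2, hr3⟩
        have h' := hA r (by omega)
        rw [pvIte_neg (fun hc => hc.1 hr3)] at h'
        exact hC2 r (by omega) (by omega) (h'.trans hr3)
      rw [pvIte_pos ⟨hxp, hcov⟩]
    · rw [pvIte_neg hC, hA p hp]
      by_cases hxp : xs.getD p "" = "<"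
      · rw [pvIte_neg (fun hc => hc.1 hxp), pvIte_neg (fun hc => hc.1 hxp)]
      · by_cases hcv : pvCovK xs i p
        · rw [pvIte_pos ⟨hxp, hcv⟩, pvIte_pos ⟨hxp, (covK_succ xs i p).2 (Or.inl hcv)⟩]
        · have hnew : ¬ (xs.getD p "" ≠ "<" ∧ pvCovK xs (i+1) p) := by
            rintro ⟨-, hcov⟩
            rcases (covK_succ xs i p).1 hcov with h | ⟨h1, -, h3⟩
            · exact hcv h
            · -- derive the inner-loop condition, contradicting hC
              apply hC
              refine ⟨by omega, fun r hr1 hr2 => ?_⟩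
              by_cases hrp : r = p
              · subst hrp
                have h' := hA r hp
                rw [pvIte_neg (fun hc => hcv hc.2)] at h'
                rw [h']; exact hxp
              · have hxr : xs.getD r "" ≠ "<" := fun hlt => h3 ⟨r, by omega, by omega, hlt⟩
                have h' := hA r (by omega)
                by_cases hc : xs.getD r "" ≠ "<" ∧ pvCovK xs i r
                · rw [pvIte_pos hc] at h'; rw [h']; decide
                · rw [pvIte_neg hc] at h'; rw [h']; exact hxr
          rw [pvIte_neg (fun hc => hcv hc.2), pvIte_neg hnew]
  · rw [if_neg htrig]
    refine ⟨hlen, fun p hp => ?_⟩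
    rw [hA p hp]
    by_cases hxp : xs.getD p "" = "<"
    · rw [pvIte_neg (fun hc => hc.1 hxp), pvIte_neg (fun hc => hc.1 hxp)]
    · have hiff : pvCovK xs i p ↔ pvCovK xs (i+1) p := by
        rw [covK_succ]
        constructor
        · exact Or.inl
        · rintro (h | ⟨h1, h2, h3⟩)
          · exact h
          · -- new opener at i: show it was already covered, or contradiction
            by_cases hci : pvCovK xs i i
            · obtain ⟨q, hq1, hq2, hq3, hq4⟩ := hci
              refine ⟨q, hq1, by omega, hq3, ?_⟩
              rintro ⟨r, hr1, hr2, hr3⟩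
              by_cases hr : r < i
              · exact hq4 ⟨r, hr1, hr, hr3⟩
              · by_cases hri : r = i
                · rw [hri, h2] at hr3; simp at hr3
                · exact h3 ⟨r, by omega, hr2, hr3⟩
            · exfalso
              have hai : a.getD i "" = ">" := by
                have h' := hA i (by omega)
                rw [pvIte_neg (fun hc => hci hc.2)] at h'
                rw [h']; exact h2
              have hai1 : a.getD (i+1) "" = "<" := by
                by_contra hne
                exact htrig ⟨hai, hne⟩
              have hxi1 : xs.getD (i+1) "" = "<" := by
                have h' := hA (i+1) hi
                by_cases hc : xs.getD (i+1) "" ≠ "<" ∧ pvCovK xs i (i+1)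
                · rw [pvIte_pos hc] at h'; rw [h'] at hai1; simp at hai1
                · rw [pvIte_neg hc] at h'; rwa [h'] at hai1
              by_cases hp1 : p = i + 1
              · rw [hp1, hxi1] at hxp; simp at hxp
              · exact h3 ⟨i+1, by omega, by omega, hxi1⟩
      rw [pvIte_congr (and_congr Iff.rfl hiff)]

lemma outer_fold : ∀ (m i : Nat) (xs a : List String), i + m ≤ xs.length - 1 →
    a.length = xs.length →
    (∀ p, p < xs.length →
      a.getD p "" = pvIte (xs.getD p "" ≠ "<" ∧ pvCovK xs i p) "string" (xs.getD p "")) →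
    ((List.range' i m).foldl pvStep a).length = xs.length ∧
    (∀ p, p < xs.length →
      ((List.range' i m).foldl pvStep a).getD p "" =
        pvIte (xs.getD p "" ≠ "<" ∧ pvCovK xs (i+m) p) "string" (xs.getD p "")) := by
  intro m
  induction m with
  | zero => intro i xs a hb hlen hA; simpa using ⟨hlen, hA⟩
  | succ m ih =>
    intro i xs a hb hlen hA
    have hi : i + 1 < xs.length := by omega
    obtain ⟨hl1, hA1⟩ := pvStep_inv xs a i hi hlen hA
    have hrec := ih (i+1) xs (pvStep a i) (by omega) hl1 hA1
    rw [List.range'_succ, List.foldl_cons]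
    have harith : i + 1 + m = i + (m + 1) := by omega
    rwa [harith] at hrec

lemma covK_top (xs : List String) (p : Nat) (hp : p < xs.length) :
    pvCovK xs (xs.length - 1) p ↔ pvCov xs p := by
  constructor
  · rintro ⟨q, hq1, hq2, hq3, hq4⟩; exact ⟨q, hq2, hq2, hq3, hq4⟩
  · rintro ⟨q, hq1, hq2, hq3, hq4⟩; exact ⟨q, by omega, hq2, hq3, hq4⟩

lemma A_char (xs : List String) :
    (handleString xs).length = xs.length ∧
    ∀ p, p < xs.length →
      (handleString xs).getD p "" =
        pvIte (xs.getD p "" ≠ "<" ∧ pvCov xs p) "string" (xs.getD p "") := by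
  have hh : handleString xs = (List.range' 0 (xs.length - 1)).foldl pvStep xs := by
    unfold handleString
    rw [List.range_eq_range']
    rfl
  have h0 : ∀ p, p < xs.length →
      xs.getD p "" = pvIte (xs.getD p "" ≠ "<" ∧ pvCovK xs 0 p) "string" (xs.getD p "") := by
    intro p hp
    rw [pvIte_neg (by rintro ⟨-, q, hq, -⟩; omega)]
  obtain ⟨h1, h2⟩ := outer_fold (xs.length - 1) 0 xs xs (by omega) rfl h0
  rw [hh]
  refine ⟨h1, fun p hp => ?_⟩
  rw [h2 p hp]
  exact pvIte_congr (and_congr Iff.rfl (by rw [Nat.zero_add, covK_top xs p hp]))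

lemma main_eq (xs : List String) : handleString xs = handleString_alt xs := by
  obtain ⟨hl, hg⟩ := A_char xs
  have hb : handleString_alt xs = pvMark xs false := altEq xs
  have hbl : (handleString_alt xs).length = xs.length := by rw [hb, markLen]
  apply List.ext_getElem (by rw [hl, hbl])
  intro p h1 h2
  have hp : p < xs.length := by rwa [hl] at h1
  rw [← List.getD_eq_getElem _ "" h1, ← List.getD_eq_getElem _ "" h2]
  rw [hg p hp, hb, markGet xs false p hp]
  apply pvIte_congr
  constructor
  · rintro ⟨ha, hb'⟩; exact ⟨ha, Or.inr hb'⟩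
  · rintro ⟨ha, (⟨hf, -⟩ | hb')⟩
    · simp at hf
    · exact ⟨ha, hb'⟩

-- ===== VERDICT (by name: the statement is the Claim_ definition above) =====
theorem handleString_spec : Claim_equal_handleString := by
  intro arr _
  show handleString arr = handleString_alt arr
  exact main_eq arr
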